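-- pv_equiv track=rewrite | github.com/ketanrisbud/us_pollen_radar | custom_components/us_pollen_radar/api.py | determine_level_by_count
-- ===== SOURCE A (Python) =====
-- def determine_level_by_count(pollen_type: str, pollen_count: int) -> str:
--     thresholds = {
--         "trees": [95, 207, 703],
--         "weeds": [20, 77, 266],
--         "grass": [29, 60, 341],
--     }
--     categories = ["low", "moderate", "high", "very-high"]
--     for i, threshold in enumerate(thresholds.get(pollen_type, [])):
--         if pollen_count <= threshold:
--             return categories[i]
--     return "very-high"
-- ===== SOURCE B (Python) =====
-- def determine_level_by_count(pollen_type: str, pollen_count: int) -> str: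
--     thresholds = {
--         "trees": [95, 207, 703],
--         "weeds": [20, 77, 266],
--         "grass": [29, 60, 341],
--     }
--     if pollen_type not in thresholds:
--         return "very-high"
--     ts = thresholds[pollen_type]
--     # hand-written bisect_left: first index with ts[i] >= pollen_count
--     lo, hi = 0, len(ts)
--     while lo < hi:
--         mid = (lo + hi) // 2
--         if ts[mid] < pollen_count:
--             lo = mid + 1
--         else:
--             hi = mid
--     return ["low", "moderate", "high", "very-high"][lo]
-- ===== Notes on version B (the rewrite author's own statement) =====
-- stated objective: alternative
-- what changed: Replaces A's linear enumerate-and-early-return scan with an unknown-type guard plus a hand-written bisect_left binary search over the sorted threshold list, indexing the category list with the resulting position.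
import Mathlib
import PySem

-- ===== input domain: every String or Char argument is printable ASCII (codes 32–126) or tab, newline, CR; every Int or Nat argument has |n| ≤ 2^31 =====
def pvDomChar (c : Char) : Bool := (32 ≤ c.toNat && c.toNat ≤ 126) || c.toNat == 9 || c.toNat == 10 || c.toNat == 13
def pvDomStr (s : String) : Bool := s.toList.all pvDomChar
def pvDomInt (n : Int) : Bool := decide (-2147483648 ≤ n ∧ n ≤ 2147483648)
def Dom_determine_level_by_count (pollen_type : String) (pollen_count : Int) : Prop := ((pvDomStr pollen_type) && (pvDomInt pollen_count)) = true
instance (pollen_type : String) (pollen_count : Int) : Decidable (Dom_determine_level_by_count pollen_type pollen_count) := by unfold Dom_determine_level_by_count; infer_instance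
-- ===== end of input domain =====

-- B replaces A's linear scan with an unknown-type guard plus a hand-written
-- bisect_left binary search over the sorted threshold list; alternative, same cost here.

-- ===== PORT A =====
-- the 'for i, threshold in enumerate(...)' loop with its early return
def pvLoopA (categories : List String) (pollen_count : Int) : List (Int × Int) → String
  | [] => "very-high"
  | (i, threshold) :: rest =>
      if pollen_count ≤ threshold then
        (PySem.List.pyGet? categories i).getD "very-high"  -- i is always in range here
      else pvLoopA categories pollen_count rest

def determine_level_by_count (pollen_type : String) (pollen_count : Int) : String :=
  let thresholds : PySem.Dict String (List Int) :=
    PySem.Dict.ofList [("trees", [95, 207, 703]), ("weeds", [20, 77, 266]), ("grass", [29, 60, 341])]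
  let categories : List String := ["low", "moderate", "high", "very-high"]
  pvLoopA categories pollen_count (PySem.List.enumerate (thresholds.getD pollen_type []))

-- ===== PORT B =====
-- the 'while lo < hi' bisect_left loop of Source B; ts[mid] is always in range (lo ≤ mid < hi ≤ len ts)
def pvBisect (ts : List Int) (x : Int) (lo hi : Nat) : Nat :=
  if h : lo < hi then
    let mid := (lo + hi) / 2
    if ((PySem.List.pyGet? ts (mid : Int)).getD 0) < x then pvBisect ts x (mid + 1) hi
    else pvBisect ts x lo mid
  else lo
termination_by hi - lo
decreasing_by all_goals omega

def determine_level_by_count_alt (pollen_type : String) (pollen_count : Int) : String :=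
  let thresholds : PySem.Dict String (List Int) :=
    PySem.Dict.ofList [("trees", [95, 207, 703]), ("weeds", [20, 77, 266]), ("grass", [29, 60, 341])]
  if ¬ thresholds.contains pollen_type then "very-high"
  else
    let ts := thresholds.getD pollen_type []
    let lo := pvBisect ts pollen_count 0 ts.length
    (["low", "moderate", "high", "very-high"].getD lo "very-high")  -- lo ≤ 3 always

-- ===== PRECONDITION & SPEC =====
def Spec_determine_level_by_count (pollen_type : String) (pollen_count : Int) (out : String) : Prop := out = determine_level_by_count_alt pollen_type pollen_count
instance (pollen_type : String) (pollen_count : Int) (out : String) : Decidable (Spec_determine_level_by_count pollen_type pollen_count out) := by unfold Spec_determine_level_by_count; infer_instance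

-- ===== CLAIM =====
def Claim_equal_determine_level_by_count : Prop := ∀ (pollen_type : String) (pollen_count : Int), Dom_determine_level_by_count pollen_type pollen_count → Spec_determine_level_by_count pollen_type pollen_count (determine_level_by_count pollen_type pollen_count)

-- ===== LEMMAS AND PROOFS =====
-- A's linear scan and B's binary search agree on any sorted three-threshold list
theorem pv_agree3 (a b c : Int) (hab : a ≤ b) (hbc : b ≤ c) (v : Int) :
    pvLoopA ["low", "moderate", "high", "very-high"] v (PySem.List.enumerate [a, b, c]) =
      (["low", "moderate", "high", "very-high"].getD (pvBisect [a, b, c] v 0 3) "very-high") := by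
  have e1 : pvBisect [a, b, c] v 0 3 = if b < v then pvBisect [a, b, c] v 2 3 else pvBisect [a, b, c] v 0 1 := by
    rw [pvBisect]; simp [PySem.List.pyGet?, PySem.List.pyIdx?]
  have e2 : pvBisect [a, b, c] v 2 3 = if c < v then 3 else 2 := by
    rw [pvBisect]; simp [PySem.List.pyGet?, PySem.List.pyIdx?]
    split_ifs <;> rw [pvBisect] <;> simp
  have e3 : pvBisect [a, b, c] v 0 1 = if a < v then 1 else 0 := by
    rw [pvBisect]; simp [PySem.List.pyGet?, PySem.List.pyIdx?]
    split_ifs <;> rw [pvBisect] <;> simp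
  rw [e1, e2, e3]
  simp only [pvLoopA, PySem.List.enumerate, PySem.List.pyGet?, PySem.List.pyIdx?]
  split_ifs <;> simp_all <;> omega

-- ===== VERDICT =====
theorem determine_level_by_count_spec : Claim_equal_determine_level_by_count := by
  intro pt c _
  unfold Spec_determine_level_by_count determine_level_by_count determine_level_by_count_alt
  dsimp only
  by_cases h1 : pt = "trees"
  · subst h1
    rw [if_neg (by decide), show (PySem.Dict.ofList [("trees", ([95, 207, 703] : List Int)), ("weeds", [20, 77, 266]), ("grass", [29, 60, 341])]).getD "trees" [] = [95, 207, 703] from rfl]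
    exact pv_agree3 95 207 703 (by norm_num) (by norm_num) c
  by_cases h2 : pt = "weeds"
  · subst h2
    rw [if_neg (by decide), show (PySem.Dict.ofList [("trees", ([95, 207, 703] : List Int)), ("weeds", [20, 77, 266]), ("grass", [29, 60, 341])]).getD "weeds" [] = [20, 77, 266] from rfl]
    exact pv_agree3 20 77 266 (by norm_num) (by norm_num) c
  by_cases h3 : pt = "grass"
  · subst h3
    rw [if_neg (by decide), show (PySem.Dict.ofList [("trees", ([95, 207, 703] : List Int)), ("weeds", [20, 77, 266]), ("grass", [29, 60, 341])]).getD "grass" [] = [29, 60, 341] from rfl]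
    exact pv_agree3 29 60 341 (by norm_num) (by norm_num) c
  · have hmk : (PySem.Dict.ofList [("trees", ([95, 207, 703] : List Int)), ("weeds", [20, 77, 266]), ("grass", [29, 60, 341])]) = PySem.Dict.mk [("trees", [95, 207, 703]), ("weeds", [20, 77, 266]), ("grass", [29, 60, 341])] := by rfl
    rw [hmk]
    have hc : (PySem.Dict.mk [("trees", ([95, 207, 703] : List Int)), ("weeds", [20, 77, 266]), ("grass", [29, 60, 341])]).contains pt = false := by
      simp [Ne.symm h1, Ne.symm h2, Ne.symm h3]
    have hg : (PySem.Dict.mk [("trees", ([95, 207, 703] : List Int)), ("weeds", [20, 77, 266]), ("grass", [29, 60, 341])]).getD pt [] = [] := by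
      simp [PySem.Dict.getD, PySem.Dict.get?, Ne.symm h1, Ne.symm h2, Ne.symm h3]
    rw [hg, hc]
    simp [pvLoopA, PySem.List.enumerate]
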